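-- pv_equiv track=rewrite | github.com/walles/px | px/px_launchcounter.py | _merge_tuple_lists
-- ===== SOURCE A (Python) =====
-- def _merge_tuple_lists(
--
--     tl1,  # type: List[Tuple[text_type, int]]
--     tl2   # type: List[Tuple[text_type, int]]
-- ):
--     # type: (...) -> Optional[List[Tuple[text_type, int]]]
--     if len(tl1) > len(tl2):
--         longer = tl1
--         shorter = tl2
--     else:
--         longer = tl2
--         shorter = tl1
--
--     merged = longer[:]
--     for i in range(0, len(shorter)):
--         t1 = shorter[i]
--         t2 = longer[i]
--         if t1[0] != t2[0]:
--             # Mismatch, we can't merge these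
--             return None
--         merged[i] = (t1[0], t1[1] + t2[1])
--
--     return merged
-- ===== SOURCE B (Python) =====
-- def _merge_tuple_lists(tl1, tl2):
--     # Columnar approach: split into name/count columns, compare the name prefix
--     # wholesale, then merge the count columns and zip back together.
--     if len(tl2) >= len(tl1):
--         tl1, tl2 = tl2, tl1   # now tl1 is the longer (or tied) list
--     k = len(tl2)
--     names = [n for n, _ in tl1]
--     if names[:k] != [n for n, _ in tl2]:
--         return None
--     counts = [c1 + c2 for (_, c1), (_, c2) in zip(tl1, tl2)] + [c for _, c in tl1[k:]]
--     return list(zip(names, counts))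
-- ===== Notes on version B (the rewrite author's own statement) =====
-- stated objective: alternative
-- what changed: B is columnar: it splits both lists into name and count columns, rejects with a single wholesale list comparison of the name prefixes (no per-element early-return loop), then builds the merged count column and zips the columns back, instead of A's index loop that copies the longer list and overwrites entries in place with a mismatch check at each step.
import Mathlib
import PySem

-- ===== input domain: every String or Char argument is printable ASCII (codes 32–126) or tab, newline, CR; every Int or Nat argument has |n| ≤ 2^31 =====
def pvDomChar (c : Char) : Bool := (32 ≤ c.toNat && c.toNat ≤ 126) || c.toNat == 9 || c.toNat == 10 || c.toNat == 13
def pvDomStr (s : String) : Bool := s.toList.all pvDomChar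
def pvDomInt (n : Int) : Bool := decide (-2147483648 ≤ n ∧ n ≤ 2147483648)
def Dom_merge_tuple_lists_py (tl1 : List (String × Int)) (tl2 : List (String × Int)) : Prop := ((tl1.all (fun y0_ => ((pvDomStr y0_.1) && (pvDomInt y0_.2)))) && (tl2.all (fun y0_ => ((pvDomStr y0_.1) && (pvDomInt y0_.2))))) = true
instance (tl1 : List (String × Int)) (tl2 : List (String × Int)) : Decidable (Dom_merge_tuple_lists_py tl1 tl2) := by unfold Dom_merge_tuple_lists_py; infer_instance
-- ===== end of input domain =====

-- B replaces A's in-place index loop over a copied longer list by a columnar decomposition: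
-- name/count columns, one wholesale name-prefix comparison, merged count column, zip back
-- (objective: alternative).


-- ===== PORT A =====
-- A's loop: for i in range(0, len(shorter)): read shorter[i], longer[i] (always in range,
-- so getD is exact), early return None on name mismatch, else merged[i] = summed pair.
def pvALoop (shorter longer : List (String × Int)) (i : Nat) (merged : List (String × Int)) :
    Option (List (String × Int)) :=
  if _h : i < shorter.length then
    if (shorter.getD i ("", 0)).1 ≠ (longer.getD i ("", 0)).1 then none
    else pvALoop shorter longer (i + 1)
      (merged.set i ((shorter.getD i ("", 0)).1, (shorter.getD i ("", 0)).2 + (longer.getD i ("", 0)).2))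
  else some merged
termination_by shorter.length - i

def merge_tuple_lists_py (tl1 : List (String × Int)) (tl2 : List (String × Int)) : Option (List (String × Int)) :=
  if tl1.length > tl2.length then
    -- longer = tl1, shorter = tl2; merged = longer[:]
    pvALoop tl2 tl1 0 tl1
  else
    pvALoop tl1 tl2 0 tl2

-- ===== PORT B =====
-- B: swap so tl1 is the longer (or tied) list, project the name columns, compare the
-- prefix wholesale, then zip the name column with the merged count column.
def merge_tuple_lists_py_alt (tl1 : List (String × Int)) (tl2 : List (String × Int)) : Option (List (String × Int)) :=
  let p := if tl2.length ≥ tl1.length then (tl2, tl1) else (tl1, tl2)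
  let a := p.1
  let b := p.2
  let k := b.length
  let names := a.map Prod.fst
  if names.take k ≠ b.map Prod.fst then none
  else some (names.zip (((a.zip b).map fun q => q.1.2 + q.2.2) ++ (a.drop k).map Prod.snd))

-- ===== PRECONDITION & SPEC =====
def Spec_merge_tuple_lists_py (tl1 : List (String × Int)) (tl2 : List (String × Int)) (out : Option (List (String × Int))) : Prop := out = merge_tuple_lists_py_alt tl1 tl2
instance (tl1 : List (String × Int)) (tl2 : List (String × Int)) (out : Option (List (String × Int))) : Decidable (Spec_merge_tuple_lists_py tl1 tl2 out) := by unfold Spec_merge_tuple_lists_py; infer_instance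

-- ===== CLAIM (what is proved, stated in full; the proofs are below) =====
def Claim_equal_merge_tuple_lists_py : Prop := ∀ (tl1 : List (String × Int)) (tl2 : List (String × Int)), Dom_merge_tuple_lists_py tl1 tl2 → Spec_merge_tuple_lists_py tl1 tl2 (merge_tuple_lists_py tl1 tl2)

-- ===== LEMMAS AND PROOFS =====

-- Proof-side intermediate form of A's loop on the zipped remainders.
def pvBLoop : List ((String × Int) × (String × Int)) → Option (List (String × Int))
  | [] => some []
  | ((n1, c1), (n2, c2)) :: rest =>
    if n1 ≠ n2 then none
    else (pvBLoop rest).map (fun m => (n1, c1 + c2) :: m)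

theorem pvBLoop_cons (p q : String × Int) (rest : List ((String × Int) × (String × Int))) :
    pvBLoop ((p, q) :: rest) =
      if p.1 ≠ q.1 then none else (pvBLoop rest).map (fun m => (p.1, p.2 + q.2) :: m) := rfl

theorem pvALoop_eq (shorter longer : List (String × Int)) :
    ∀ i merged, i ≤ shorter.length → shorter.length ≤ longer.length →
      merged.length = longer.length →
      pvALoop shorter longer i merged =
        match pvBLoop ((shorter.drop i).zip (longer.drop i)) with
        | none => none
        | some m => some (merged.take i ++ m ++ merged.drop shorter.length) := by
  intro i merged
  induction i, merged using pvALoop.induct shorter longer with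
  | case1 i merged h hne =>
    intro hi hsl hm
    have hil : i < longer.length := lt_of_lt_of_le h hsl
    have e1 : shorter.getD i ("", 0) = shorter[i] := List.getD_eq_getElem _ _ h
    have e2 : longer.getD i ("", 0) = longer[i] := List.getD_eq_getElem _ _ hil
    rw [pvALoop, dif_pos h, if_pos hne, List.drop_eq_getElem_cons h,
        List.drop_eq_getElem_cons hil, List.zip_cons_cons, pvBLoop_cons]
    rw [e1, e2] at hne
    rw [if_pos hne]
  | case2 i merged h hne ih =>
    intro hi hsl hm
    have hil : i < longer.length := lt_of_lt_of_le h hsl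
    have him : i < merged.length := by omega
    have e1 : shorter.getD i ("", 0) = shorter[i] := List.getD_eq_getElem _ _ h
    have e2 : longer.getD i ("", 0) = longer[i] := List.getD_eq_getElem _ _ hil
    have heq : ¬ shorter[i].1 ≠ longer[i].1 := by rwa [e1, e2] at hne
    rw [pvALoop, dif_pos h, if_neg hne,
        ih (by omega) hsl (by simpa using hm)]
    rw [List.drop_eq_getElem_cons h, List.drop_eq_getElem_cons hil,
        List.zip_cons_cons, pvBLoop_cons, if_neg heq]
    cases hb : pvBLoop ((shorter.drop (i + 1)).zip (longer.drop (i + 1))) with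
    | none => rfl
    | some m =>
      simp only [Option.map_some]
      rw [e1, e2]
      have hA : (merged.set i (shorter[i].1, shorter[i].2 + longer[i].2)).take (i + 1) =
          merged.take i ++ [(shorter[i].1, shorter[i].2 + longer[i].2)] := by
        rw [List.set_eq_take_append_cons_drop, if_pos him, List.take_append]
        have hl : (merged.take i).length = i := by simp; omega
        rw [hl]
        simp [List.take_take]
      have hB : (merged.set i (shorter[i].1, shorter[i].2 + longer[i].2)).drop shorter.length =
          merged.drop shorter.length := List.drop_set_of_lt h
      rw [hA, hB]
      have h12 : shorter[i].1 = longer[i].1 := not_not.mp heq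
      simp [h12]
  | case3 i merged h =>
    intro hi hsl hm
    have : i = shorter.length := by omega
    subst this
    rw [pvALoop, dif_neg h]
    simp [pvBLoop, List.take_append_drop]

-- The zipped-loop form equals B's columnar form, for shorter s against longer l.
theorem pvCol_eq : ∀ (s l : List (String × Int)), s.length ≤ l.length →
    (match pvBLoop (s.zip l) with
      | none => none
      | some m => some (m ++ l.drop s.length))
    = if (l.map Prod.fst).take s.length ≠ s.map Prod.fst then none
      else some ((l.map Prod.fst).zip
        (((l.zip s).map fun q => q.1.2 + q.2.2) ++ (l.drop s.length).map Prod.snd)) := by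
  intro s
  induction s with
  | nil =>
    intro l _
    simp [pvBLoop, List.zip_map']
  | cons hd tl ih =>
    intro l hl
    cases l with
    | nil => simp at hl
    | cons hd' tl' =>
      obtain ⟨n1, c1⟩ := hd
      obtain ⟨n2, c2⟩ := hd'
      simp only [List.zip_cons_cons, pvBLoop, List.map_cons, List.length_cons,
        List.take_succ_cons, List.drop_succ_cons]
      by_cases hne : n1 ≠ n2
      · rw [if_pos hne, if_pos]
        simp [hne.symm]
      · have h12 : n1 = n2 := not_not.mp hne
        subst h12
        rw [if_neg hne]
        have := ih tl' (by simpa using hl)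
        by_cases hc : (tl'.map Prod.fst).take tl.length ≠ tl.map Prod.fst
        · rw [if_pos hc] at this
          rw [if_pos (show n1 :: (tl'.map Prod.fst).take tl.length ≠ n1 :: tl.map Prod.fst by simp [hc])]
          cases hb : pvBLoop (tl.zip tl') with
          | none => simp
          | some m =>
            exfalso
            rw [hb] at this
            simp at this
        · rw [if_neg hc] at this
          rw [if_neg (show ¬ (n1 :: (tl'.map Prod.fst).take tl.length ≠ n1 :: tl.map Prod.fst) by simp [hc])]
          cases hb : pvBLoop (tl.zip tl') with
          | none =>
            exfalso
            rw [hb] at this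
            simp at this
          | some m =>
            rw [hb] at this
            simp only [Option.map_some, Option.some.injEq] at this ⊢
            simp only [List.cons_append]
            rw [List.zip_cons_cons, ← this, Int.add_comm c2 c1]

theorem merge_tuple_lists_py_eq (tl1 tl2 : List (String × Int)) :
    merge_tuple_lists_py tl1 tl2 = merge_tuple_lists_py_alt tl1 tl2 := by
  unfold merge_tuple_lists_py merge_tuple_lists_py_alt
  by_cases h : tl1.length > tl2.length
  · have h2 : ¬ tl2.length ≥ tl1.length := by omega
    simp only [if_pos h, if_neg h2]
    rw [pvALoop_eq tl2 tl1 0 tl1 (by omega) (by omega) rfl]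
    simpa using pvCol_eq tl2 tl1 (by omega)
  · have h2 : tl2.length ≥ tl1.length := by omega
    simp only [if_neg h, if_pos h2]
    rw [pvALoop_eq tl1 tl2 0 tl2 (by omega) (by omega) rfl]
    simpa using pvCol_eq tl1 tl2 (by omega)

-- ===== VERDICT (by name: the statement is the Claim_ definition above) =====
theorem merge_tuple_lists_py_spec : Claim_equal_merge_tuple_lists_py := by
  intro tl1 tl2 _
  exact merge_tuple_lists_py_eq tl1 tl2
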